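-- pv_equiv track=rewrite | github.com/eedalachaitanya-creator/predictive-analytics | backend/analyst_backend/scout/scraper.py | _extract_all_domain_parts
-- ===== SOURCE A (Python) =====
-- def _extract_all_domain_parts(host: str) -> set[str]:
--     """
--     Extract all meaningful parts from a hostname.
--     'shop.beatoapp.com' → {'shop', 'beatoapp'}
--     'www.myntra.com' → {'myntra'}
--     """
--     # Strip known TLDs first
--     clean = host
--     for suffix in [".co.in", ".com.au", ".co.uk", ".com", ".in", ".net", ".io", ".co", ".org"]:
--         if clean.endswith(suffix):
--             clean = clean[:-len(suffix)]
--             break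
--     parts = {p for p in clean.split(".") if p and p != "www" and p != "m"}
--     return parts
-- ===== SOURCE B (Python) =====
-- def _extract_all_domain_parts(host: str) -> set[str]:
--     """Label-based re-implementation: split into labels first, then peel the TLD
--     off the label list instead of string-suffix matching."""
--     parts = host.split(".")
--     if len(parts) > 2 and ".".join(parts[-2:]) in {"co.in", "com.au", "co.uk"}:
--         parts = parts[:-2]
--     elif len(parts) > 1 and parts[-1] in {"com", "in", "net", "io", "co", "org"}:
--         parts = parts[:-1]
--     return {p for p in parts if p and p not in ("www", "m")}
-- ===== Notes on version B (the rewrite author's own statement) =====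
-- stated objective: alternative
-- what changed: A strips a known TLD by string-suffix matching (endswith + negative slice) before splitting; B splits the host into labels first and peels the TLD off the label list (drop last two labels for two-label TLDs, else last one), then filters.
import Mathlib
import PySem

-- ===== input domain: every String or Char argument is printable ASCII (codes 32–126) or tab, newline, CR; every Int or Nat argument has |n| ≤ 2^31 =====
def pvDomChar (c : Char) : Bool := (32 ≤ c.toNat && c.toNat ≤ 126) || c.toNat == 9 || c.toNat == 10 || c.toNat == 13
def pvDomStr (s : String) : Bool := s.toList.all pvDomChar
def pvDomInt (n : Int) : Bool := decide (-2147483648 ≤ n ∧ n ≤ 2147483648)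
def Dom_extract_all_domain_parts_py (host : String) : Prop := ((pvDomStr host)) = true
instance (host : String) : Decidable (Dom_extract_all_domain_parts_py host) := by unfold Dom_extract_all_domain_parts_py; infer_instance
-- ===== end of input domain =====

-- B peels the TLD off the label list after splitting, instead of A's string-suffix stripping before splitting; return value only (A returns a set).

-- ===== PORT A =====
def pvSuffixes : List String := [".co.in", ".com.au", ".co.uk", ".com", ".in", ".net", ".io", ".co", ".org"]

-- the 'for suffix in …: if clean.endswith(suffix): clean = clean[:-len(suffix)]; break' loop
def pvStripTLD (clean : String) : List String → String
  | [] => clean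
  | sfx :: rest =>
    if PySem.Str.endswith clean sfx then PySem.Str.slice clean none (some (-(PySem.Str.len sfx)))
    else pvStripTLD clean rest

def extract_all_domain_parts_py (host : String) : List String :=
  let clean := pvStripTLD host pvSuffixes
  PySem.Set.ofList (((PySem.Str.split? clean ".").getD []).filter
    (fun p => p != "" && p != "www" && p != "m"))

-- ===== PORT B =====
def extract_all_domain_parts_py_alt (host : String) : List String :=
  let parts := (PySem.Str.split? host ".").getD []
  let parts2 :=
    if 2 < parts.length ∧ PySem.Set.contains (PySem.Set.ofList ["co.in", "com.au", "co.uk"])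
        (PySem.Str.join "." (PySem.List.slice parts (some (-2)) none)) = true then
      PySem.List.slice parts none (some (-2))
    else if 1 < parts.length ∧ PySem.Set.contains (PySem.Set.ofList ["com", "in", "net", "io", "co", "org"])
        ((PySem.List.pyGet? parts (-1)).getD "") = true then
      PySem.List.slice parts none (some (-1))
    else parts
  PySem.Set.ofList (parts2.filter (fun p => p != "" && p != "www" && p != "m"))

-- ===== PRECONDITION & SPEC =====
def Spec_extract_all_domain_parts_py (host : String) (out : List String) : Prop := out = extract_all_domain_parts_py_alt host
instance (host : String) (out : List String) : Decidable (Spec_extract_all_domain_parts_py host out) := by unfold Spec_extract_all_domain_parts_py; infer_instance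

-- ===== CLAIM (what is proved, stated in full; the proofs are below) =====
def Claim_equal_extract_all_domain_parts_py : Prop := ∀ (host : String), Dom_extract_all_domain_parts_py host → Spec_extract_all_domain_parts_py host (extract_all_domain_parts_py host)

-- ===== LEMMAS AND PROOFS =====

-- structural split on '.' (proof-only model of Python's str.split("."))
def mySplit : List Char → List (List Char)
  | [] => [[]]
  | c :: rest => if c = '.' then [] :: mySplit rest else (mySplit rest).modifyHead (fun h => c :: h)

theorem mySplit_ne_nil (l : List Char) : mySplit l ≠ [] := by
  cases l with
  | nil => simp [mySplit]
  | cons c rest =>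
    simp only [mySplit]
    split
    · simp
    · intro h
      have := mySplit_ne_nil rest
      cases hm : mySplit rest with
      | nil => exact this hm
      | cons a b => rw [hm] at h; simp at h

theorem splitOn_go_dot (fuel : Nat) : ∀ (l cur : List Char) (acc : List (List Char)),
    l.length ≤ fuel →
    PySem.Chars.splitOn.go ['.'] fuel l cur acc
      = acc.reverse ++ (mySplit l).modifyHead (fun h => cur.reverse ++ h) := by
  induction fuel with
  | zero =>
    intro l cur acc hl
    have : l = [] := by cases l <;> simp_all
    subst this
    rw [PySem.Chars.splitOn.go.eq_def]
    simp [mySplit]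
  | succ fuel ih =>
    intro l cur acc hl
    cases l with
    | nil =>
      rw [PySem.Chars.splitOn.go.eq_def]
      simp [mySplit]
    | cons c rest =>
      rw [PySem.Chars.splitOn.go.eq_def]
      simp only [List.isPrefixOf, Bool.and_true, List.length_cons, List.length_singleton]
      by_cases hc : c = '.'
      · subst hc
        rw [if_pos (by simp)]
        have hdrop : List.drop (([] : List Char).length + 1) ('.' :: rest) = rest := rfl
        rw [hdrop]
        rw [ih rest [] (cur.reverse :: acc) (by simp at hl; omega)]
        simp only [mySplit, if_pos rfl]
        cases hm : mySplit rest <;> simp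
      · rw [if_neg (by simp [Ne.symm hc])]
        rw [ih rest (c :: cur) acc (by simp at hl; omega)]
        simp only [mySplit, if_neg hc]
        cases hm : mySplit rest with
        | nil => exact absurd hm (mySplit_ne_nil rest)
        | cons a b => simp

theorem splitOn_dot (l : List Char) : PySem.Chars.splitOn l ['.'] = mySplit l := by
  unfold PySem.Chars.splitOn
  rw [splitOn_go_dot (l.length + 1) l [] [] (by omega)]
  cases hm : mySplit l with
  | nil => exact absurd hm (mySplit_ne_nil l)
  | cons a b => simp

theorem mySplit_append (a b : List Char) : mySplit (a ++ '.' :: b) = mySplit a ++ mySplit b := by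
  induction a with
  | nil => simp [mySplit]
  | cons c a' ih =>
    by_cases hc : c = '.'
    · subst hc; simp [mySplit, ih]
    · simp only [List.cons_append, mySplit, if_neg hc, ih]
      cases hm : mySplit a' with
      | nil => exact absurd hm (mySplit_ne_nil a')
      | cons x y => simp

theorem mySplit_nodot (t : List Char) (ht : ('.' : Char) ∉ t) : mySplit t = [t] := by
  induction t with
  | nil => simp [mySplit]
  | cons c r ih =>
    have hc : c ≠ '.' := fun h => ht (h ▸ List.mem_cons_self)
    rw [show mySplit (c :: r) = (mySplit r).modifyHead (fun h => c :: h) from by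
      rw [mySplit, if_neg hc]]
    rw [ih (fun h => ht (List.mem_cons_of_mem _ h))]
    rfl

theorem mem_mySplit_nodot (cs : List Char) (p : List Char) (hp : p ∈ mySplit cs) : ('.' : Char) ∉ p := by
  induction cs generalizing p with
  | nil => simp [mySplit] at hp; subst hp; simp
  | cons c rest ih =>
    by_cases hc : c = '.'
    · rw [show mySplit (c :: rest) = [] :: mySplit rest from by rw [mySplit, if_pos hc]] at hp
      rcases List.mem_cons.mp hp with h | h
      · subst h; simp
      · exact ih p h
    · rw [show mySplit (c :: rest) = (mySplit rest).modifyHead (fun h => c :: h) from by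
        rw [mySplit, if_neg hc]] at hp
      cases hm : mySplit rest with
      | nil => exact absurd hm (mySplit_ne_nil rest)
      | cons x y =>
        rw [hm, List.modifyHead_cons] at hp
        rcases List.mem_cons.mp hp with h | h
        · subst h
          intro hmem
          rcases List.mem_cons.mp hmem with h' | h'
          · exact hc h'.symm
          · exact ih x (by rw [hm]; exact List.mem_cons_self) h'
        · exact ih p (by rw [hm]; exact List.mem_cons_of_mem _ h)

-- join with '.'
def joinDots : List (List Char) → List Char
  | [] => []
  | [p] => p
  | p :: ps => p ++ '.' :: joinDots ps

theorem joinDots_cons (p : List Char) (ps : List (List Char)) (h : ps ≠ []) :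
    joinDots (p :: ps) = p ++ '.' :: joinDots ps := by
  cases ps with
  | nil => exact absurd rfl h
  | cons q qs => rfl



theorem joinDots_mySplit (cs : List Char) : joinDots (mySplit cs) = cs := by
  induction cs with
  | nil => simp [mySplit, joinDots]
  | cons c rest ih =>
    by_cases hc : c = '.'
    · rw [show mySplit (c :: rest) = [] :: mySplit rest from by rw [mySplit, if_pos hc]]
      rw [joinDots_cons _ _ (mySplit_ne_nil rest), ih, hc]
      simp
    · rw [show mySplit (c :: rest) = (mySplit rest).modifyHead (fun h => c :: h) from by
        rw [mySplit, if_neg hc]]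
      cases hm : mySplit rest with
      | nil => exact absurd hm (mySplit_ne_nil rest)
      | cons x y =>
        rw [hm] at ih
        cases y with
        | nil => simp [joinDots] at ih ⊢; simp [ih]
        | cons z w =>
          rw [List.modifyHead_cons, joinDots_cons (c :: x) (z :: w) (by simp), ← ih]
          simp [joinDots_cons x (z :: w) (by simp)]

theorem joinDots_append_singleton (qs : List (List Char)) (t : List Char) (h : qs ≠ []) :
    joinDots (qs ++ [t]) = joinDots qs ++ '.' :: t := by
  induction qs with
  | nil => exact absurd rfl h
  | cons p ps ih =>
    cases hps : ps with
    | nil => simp [joinDots]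
    | cons x y =>
      subst hps
      have h1 := ih (by simp)
      rw [joinDots_cons p (x :: y) (by simp), List.cons_append,
        joinDots_cons p ((x :: y) ++ [t]) (by simp), h1]
      simp

theorem ends_one_iff (cs t : List Char) (ht : ('.' : Char) ∉ t) :
    (('.' :: t) <:+ cs) ↔ ∃ qs, qs ≠ [] ∧ mySplit cs = qs ++ [t] := by
  constructor
  · rintro ⟨a, rfl⟩
    exact ⟨mySplit a, mySplit_ne_nil a, by rw [mySplit_append, mySplit_nodot t ht]⟩
  · rintro ⟨qs, hqs, hsp⟩
    have : cs = joinDots qs ++ '.' :: t := by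
      rw [← joinDots_mySplit cs, hsp, joinDots_append_singleton _ _ hqs]
    exact ⟨joinDots qs, this.symm⟩

theorem ends_two_iff (cs u v : List Char) (hu : ('.' : Char) ∉ u) (hv : ('.' : Char) ∉ v) :
    (('.' :: (u ++ '.' :: v)) <:+ cs) ↔ ∃ qs, qs ≠ [] ∧ mySplit cs = qs ++ [u, v] := by
  constructor
  · rintro ⟨a, rfl⟩
    refine ⟨mySplit a, mySplit_ne_nil a, ?_⟩
    rw [mySplit_append, mySplit_append, mySplit_nodot u hu, mySplit_nodot v hv]
    simp
  · rintro ⟨qs, hqs, hsp⟩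
    have h1 : cs = joinDots (qs ++ [u]) ++ '.' :: v := by
      rw [← joinDots_mySplit cs, hsp]
      have : qs ++ [u, v] = (qs ++ [u]) ++ [v] := by simp
      rw [this, joinDots_append_singleton _ _ (by simp)]
    rw [joinDots_append_singleton _ _ hqs] at h1
    exact ⟨joinDots qs, by rw [h1]; simp⟩

theorem dot_join_inj (p q p' q' : List Char) (hp : ('.' : Char) ∉ p) (hp' : ('.' : Char) ∉ p')
    (h : p ++ '.' :: q = p' ++ '.' :: q') : p = p' ∧ q = q' := by
  induction p generalizing p' with
  | nil =>
    cases p' with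
    | nil => simpa using h
    | cons x xs =>
      simp only [List.nil_append, List.cons_append, List.cons.injEq] at h
      exact absurd (h.1 ▸ List.mem_cons_self) hp'
  | cons c cs ih =>
    cases p' with
    | nil =>
      simp only [List.cons_append, List.nil_append, List.cons.injEq] at h
      exact absurd (h.1 ▸ List.mem_cons_self) hp
    | cons x xs =>
      simp only [List.cons_append, List.cons.injEq] at h
      obtain ⟨rfl, h2⟩ := h
      obtain ⟨h3, h4⟩ := ih xs (fun hm => hp (List.mem_cons_of_mem _ hm))
        (fun hm => hp' (List.mem_cons_of_mem _ hm)) h2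
      exact ⟨by rw [h3], h4⟩

-- split? bridge
theorem split_getD (s : String) :
    (PySem.Str.split? s ".").getD [] = (mySplit s.toList).map String.ofList := by
  simp [PySem.Str.split?, PySem.Chars.split?, splitOn_dot]


-- endswith bridges
theorem endswith_two (host sfx : String) (u v : List Char)
    (hsfx : sfx.toList = '.' :: (u ++ '.' :: v)) (hu : ('.' : Char) ∉ u) (hv : ('.' : Char) ∉ v) :
    PySem.Str.endswith host sfx = true ↔ ∃ qs, qs ≠ [] ∧ mySplit host.toList = qs ++ [u, v] := by
  rw [show PySem.Str.endswith host sfx = PySem.Chars.endswith host.toList sfx.toList from rfl,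
    PySem.Chars.endswith_iff, hsfx, ends_two_iff _ _ _ hu hv]

theorem endswith_one (host sfx : String) (t : List Char)
    (hsfx : sfx.toList = '.' :: t) (ht : ('.' : Char) ∉ t) :
    PySem.Str.endswith host sfx = true ↔ ∃ qs, qs ≠ [] ∧ mySplit host.toList = qs ++ [t] := by
  rw [show PySem.Str.endswith host sfx = PySem.Chars.endswith host.toList sfx.toList from rfl,
    PySem.Chars.endswith_iff, hsfx, ends_one_iff _ _ ht]

-- A's slice-strip at split level
theorem stripA_two (host sfx : String) (u v : List Char) (qs : List (List Char))
    (hsfx : sfx.toList = '.' :: (u ++ '.' :: v)) (hu : ('.' : Char) ∉ u) (hv : ('.' : Char) ∉ v)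
    (hqs : qs ≠ []) (hps : mySplit host.toList = qs ++ [u, v]) :
    (PySem.Str.split? (PySem.Str.slice host none (some (-(PySem.Str.len sfx)))) ".").getD []
      = qs.map String.ofList := by
  rw [split_getD]
  have hsuf : sfx.toList <:+ host.toList := by
    rw [hsfx]; exact (ends_two_iff _ _ _ hu hv).mpr ⟨qs, hqs, hps⟩
  obtain ⟨a, ha⟩ := hsuf
  have hms : mySplit host.toList = mySplit a ++ [u, v] := by
    rw [← ha, hsfx, mySplit_append, mySplit_append, mySplit_nodot u hu, mySplit_nodot v hv]
    simp
  have hq : mySplit a = qs := by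
    have h := hms.symm.trans hps
    exact (List.append_inj h (by have := congrArg List.length h; simpa using this)).1
  have hsl : (PySem.Str.slice host none (some (-(PySem.Str.len sfx)))).toList = a := by
    rw [PySem.Str.toList_slice, PySem.Chars.slice_eq_listSlice,
      show PySem.Str.len sfx = ((sfx.toList.length : Nat) : Int) from rfl,
      PySem.List.slice_to_neg_natCast _ _ (by rw [hsfx]; simp)]
    rw [← ha]
    have hl : (a ++ sfx.toList).length - sfx.toList.length = a.length := by simp
    rw [hl, List.take_left]
  rw [hsl, hq]

theorem stripA_one (host sfx : String) (t : List Char) (qs : List (List Char))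
    (hsfx : sfx.toList = '.' :: t) (ht : ('.' : Char) ∉ t)
    (hqs : qs ≠ []) (hps : mySplit host.toList = qs ++ [t]) :
    (PySem.Str.split? (PySem.Str.slice host none (some (-(PySem.Str.len sfx)))) ".").getD []
      = qs.map String.ofList := by
  rw [split_getD]
  have hsuf : sfx.toList <:+ host.toList := by
    rw [hsfx]; exact (ends_one_iff _ _ ht).mpr ⟨qs, hqs, hps⟩
  obtain ⟨a, ha⟩ := hsuf
  have hms : mySplit host.toList = mySplit a ++ [t] := by
    rw [← ha, hsfx, mySplit_append, mySplit_nodot t ht]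
  have hq : mySplit a = qs := by
    have h := hms.symm.trans hps
    exact (List.append_inj h (by have := congrArg List.length h; simpa using this)).1
  have hsl : (PySem.Str.slice host none (some (-(PySem.Str.len sfx)))).toList = a := by
    rw [PySem.Str.toList_slice, PySem.Chars.slice_eq_listSlice,
      show PySem.Str.len sfx = ((sfx.toList.length : Nat) : Int) from rfl,
      PySem.List.slice_to_neg_natCast _ _ (by rw [hsfx]; simp)]
    rw [← ha]
    have hl : (a ++ sfx.toList).length - sfx.toList.length = a.length := by simp
    rw [hl, List.take_left]
  rw [hsl, hq]

-- small computation helpers for B's branches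
theorem join2_string (x y : List Char) :
    PySem.Str.join "." [String.ofList x, String.ofList y] = String.ofList (x ++ '.' :: y) := by
  simp [PySem.Str.join, PySem.Chars.join, List.intercalate]

theorem pyGet_last (xs : List String) (x : String) :
    PySem.List.pyGet? (xs ++ [x]) (-1) = some x := by
  simp [PySem.List.pyGet?, PySem.List.pyIdx?]

theorem take2_of (cs : List Char) (u v : List Char) (qs : List (List Char))
    (hps : mySplit cs = qs ++ [u, v]) :
    PySem.List.slice ((mySplit cs).map String.ofList) none (some (-2)) = qs.map String.ofList := by
  rw [hps, PySem.List.slice_to_neg_ofNat _ 2 (by norm_num), List.map_append]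
  have h : ((qs.map String.ofList) ++ ([u, v].map String.ofList)).length - 2
      = (qs.map String.ofList).length := by simp
  rw [h, List.take_left]

theorem drop1_of (cs : List Char) (t : List Char) (qs : List (List Char))
    (hps : mySplit cs = qs ++ [t]) :
    PySem.List.slice ((mySplit cs).map String.ofList) none (some (-1)) = qs.map String.ofList := by
  rw [hps, PySem.List.slice_to_neg_one, List.map_append]
  exact List.dropLast_concat

theorem slice2_of (cs : List Char) (u v : List Char) (qs : List (List Char))
    (hps : mySplit cs = qs ++ [u, v]) :
    PySem.List.slice ((mySplit cs).map String.ofList) (some (-2)) none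
      = [String.ofList u, String.ofList v] := by
  rw [hps, PySem.List.slice_from_neg_ofNat _ 2 (by norm_num), List.map_append]
  have h : ((qs.map String.ofList) ++ ([u, v].map String.ofList)).length - 2
      = (qs.map String.ofList).length := by simp
  rw [h, List.drop_left]
  rfl

-- B's first branch condition, characterized by the label decomposition of the host
theorem bcond1_mpr (cs : List Char) (u v : List Char) (qs : List (List Char))
    (hqs : qs ≠ []) (hps : mySplit cs = qs ++ [u, v])
    (hmem : PySem.Set.contains (PySem.Set.ofList ["co.in", "com.au", "co.uk"])
      (String.ofList (u ++ '.' :: v)) = true) :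
    2 < ((mySplit cs).map String.ofList).length ∧
      PySem.Set.contains (PySem.Set.ofList ["co.in", "com.au", "co.uk"])
        (PySem.Str.join "." (PySem.List.slice ((mySplit cs).map String.ofList) (some (-2)) none)) = true := by
  refine ⟨?_, ?_⟩
  · rw [hps]
    have := List.length_pos_iff.mpr hqs
    simp
    omega
  · rw [slice2_of cs u v qs hps, join2_string]
    exact hmem

theorem bcond2_mpr (cs : List Char) (t : List Char) (qs : List (List Char))
    (hqs : qs ≠ []) (hps : mySplit cs = qs ++ [t])
    (hmem : PySem.Set.contains (PySem.Set.ofList ["com", "in", "net", "io", "co", "org"])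
      (String.ofList t) = true) :
    1 < ((mySplit cs).map String.ofList).length ∧
      PySem.Set.contains (PySem.Set.ofList ["com", "in", "net", "io", "co", "org"])
        ((PySem.List.pyGet? ((mySplit cs).map String.ofList) (-1)).getD "") = true := by
  refine ⟨?_, ?_⟩
  · rw [hps]
    have := List.length_pos_iff.mpr hqs
    simp
    omega
  · rw [hps, List.map_append, show ([t].map String.ofList) = [String.ofList t] from rfl,
      pyGet_last, Option.getD_some]
    exact hmem

theorem bcond1_iff (cs : List Char) :
    (2 < ((mySplit cs).map String.ofList).length ∧
      PySem.Set.contains (PySem.Set.ofList ["co.in", "com.au", "co.uk"])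
        (PySem.Str.join "." (PySem.List.slice ((mySplit cs).map String.ofList) (some (-2)) none)) = true)
    ↔ ((∃ qs, qs ≠ [] ∧ mySplit cs = qs ++ [['c','o'], ['i','n']]) ∨
       (∃ qs, qs ≠ [] ∧ mySplit cs = qs ++ [['c','o','m'], ['a','u']]) ∨
       (∃ qs, qs ≠ [] ∧ mySplit cs = qs ++ [['c','o'], ['u','k']])) := by
  constructor
  · rintro ⟨hn, hcont⟩
    have hn' : 2 < (mySplit cs).length := by simpa using hn
    have hlen2 : (List.drop ((mySplit cs).length - 2) (mySplit cs)).length = 2 := by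
      rw [List.length_drop]; omega
    obtain ⟨x, y, hxy⟩ := List.length_eq_two.mp hlen2
    have hps : mySplit cs = List.take ((mySplit cs).length - 2) (mySplit cs) ++ [x, y] := by
      rw [← hxy, List.take_append_drop]
    have hqs : List.take ((mySplit cs).length - 2) (mySplit cs) ≠ [] := by
      intro h
      have := congrArg List.length h
      rw [List.length_take] at this
      simp at this
      omega
    have hx : ('.' : Char) ∉ x :=
      mem_mySplit_nodot cs x (List.mem_of_mem_drop (hxy ▸ List.mem_cons_self))
    have hy : ('.' : Char) ∉ y :=
      mem_mySplit_nodot cs y (List.mem_of_mem_drop (hxy ▸ List.mem_cons_of_mem _ List.mem_cons_self))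
    rw [slice2_of cs x y _ hps, join2_string] at hcont
    have hmem : String.ofList (x ++ '.' :: y) ∈ (["co.in", "com.au", "co.uk"] : List String) := by
      have h1 : PySem.Set.ofList ["co.in", "com.au", "co.uk"] = (["co.in", "com.au", "co.uk"] : List String) := by decide
      rw [PySem.Set.contains, h1] at hcont
      exact List.contains_iff_mem.mp hcont
    have htl : ∀ s : String, String.ofList (x ++ '.' :: y) = s → x ++ '.' :: y = s.toList := by
      intro s hs
      have := congrArg String.toList hs
      simpa using this
    rcases List.mem_cons.mp hmem with h | h
    · obtain ⟨hx', hy'⟩ := dot_join_inj x y ['c','o'] ['i','n'] hx (by decide) (htl _ h)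
      exact Or.inl ⟨_, hqs, by rw [← hx', ← hy']; exact hps⟩
    rcases List.mem_cons.mp h with h | h
    · obtain ⟨hx', hy'⟩ := dot_join_inj x y ['c','o','m'] ['a','u'] hx (by decide) (htl _ h)
      exact Or.inr (Or.inl ⟨_, hqs, by rw [← hx', ← hy']; exact hps⟩)
    rcases List.mem_cons.mp h with h | h
    · obtain ⟨hx', hy'⟩ := dot_join_inj x y ['c','o'] ['u','k'] hx (by decide) (htl _ h)
      exact Or.inr (Or.inr ⟨_, hqs, by rw [← hx', ← hy']; exact hps⟩)
    · simp at h
  · rintro (⟨qs, hqs, hps⟩ | ⟨qs, hqs, hps⟩ | ⟨qs, hqs, hps⟩)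
    · exact bcond1_mpr cs _ _ qs hqs hps (by decide)
    · exact bcond1_mpr cs _ _ qs hqs hps (by decide)
    · exact bcond1_mpr cs _ _ qs hqs hps (by decide)

theorem bcond2_iff (cs : List Char) :
    (1 < ((mySplit cs).map String.ofList).length ∧
      PySem.Set.contains (PySem.Set.ofList ["com", "in", "net", "io", "co", "org"])
        ((PySem.List.pyGet? ((mySplit cs).map String.ofList) (-1)).getD "") = true)
    ↔ ((∃ qs, qs ≠ [] ∧ mySplit cs = qs ++ [['c','o','m']]) ∨
       (∃ qs, qs ≠ [] ∧ mySplit cs = qs ++ [['i','n']]) ∨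
       (∃ qs, qs ≠ [] ∧ mySplit cs = qs ++ [['n','e','t']]) ∨
       (∃ qs, qs ≠ [] ∧ mySplit cs = qs ++ [['i','o']]) ∨
       (∃ qs, qs ≠ [] ∧ mySplit cs = qs ++ [['c','o']]) ∨
       (∃ qs, qs ≠ [] ∧ mySplit cs = qs ++ [['o','r','g']])) := by
  constructor
  · rintro ⟨hn, hcont⟩
    have hn' : 1 < (mySplit cs).length := by simpa using hn
    have hne : mySplit cs ≠ [] := mySplit_ne_nil cs
    have hps : mySplit cs = (mySplit cs).dropLast ++ [(mySplit cs).getLast hne] :=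
      (List.dropLast_append_getLast hne).symm
    have hqs : (mySplit cs).dropLast ≠ [] := by
      intro h
      have := congrArg List.length h
      rw [List.length_dropLast] at this
      simp at this
      omega
    have hget : PySem.List.pyGet? ((mySplit cs).map String.ofList) (-1)
        = some (String.ofList ((mySplit cs).getLast hne)) := by
      conv_lhs => rw [hps]
      rw [List.map_append]
      exact pyGet_last _ _
    rw [hget, Option.getD_some] at hcont
    have hmem : String.ofList ((mySplit cs).getLast hne)
        ∈ (["com", "in", "net", "io", "co", "org"] : List String) := by
      have h1 : PySem.Set.ofList ["com", "in", "net", "io", "co", "org"]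
          = (["com", "in", "net", "io", "co", "org"] : List String) := by decide
      rw [PySem.Set.contains, h1] at hcont
      exact List.contains_iff_mem.mp hcont
    have htl : ∀ s : String, String.ofList ((mySplit cs).getLast hne) = s →
        (mySplit cs).getLast hne = s.toList := by
      intro s hs
      have := congrArg String.toList hs
      simpa using this
    simp only [List.mem_cons, List.not_mem_nil, or_false] at hmem
    rcases hmem with h | h | h | h | h | h
    · exact Or.inl ⟨_, hqs, by have h2 : (mySplit cs).getLast hne = (['c','o','m'] : List Char) := htl _ h; rw [← h2]; exact hps⟩
    · exact Or.inr (Or.inl ⟨_, hqs, by have h2 : (mySplit cs).getLast hne = (['i','n'] : List Char) := htl _ h; rw [← h2]; exact hps⟩)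
    · exact Or.inr (Or.inr (Or.inl ⟨_, hqs, by have h2 : (mySplit cs).getLast hne = (['n','e','t'] : List Char) := htl _ h; rw [← h2]; exact hps⟩))
    · exact Or.inr (Or.inr (Or.inr (Or.inl ⟨_, hqs, by have h2 : (mySplit cs).getLast hne = (['i','o'] : List Char) := htl _ h; rw [← h2]; exact hps⟩)))
    · exact Or.inr (Or.inr (Or.inr (Or.inr (Or.inl ⟨_, hqs, by have h2 : (mySplit cs).getLast hne = (['c','o'] : List Char) := htl _ h; rw [← h2]; exact hps⟩))))
    · exact Or.inr (Or.inr (Or.inr (Or.inr (Or.inr ⟨_, hqs, by have h2 : (mySplit cs).getLast hne = (['o','r','g'] : List Char) := htl _ h; rw [← h2]; exact hps⟩))))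
  · rintro (⟨qs, hqs, hps⟩ | ⟨qs, hqs, hps⟩ | ⟨qs, hqs, hps⟩ | ⟨qs, hqs, hps⟩ | ⟨qs, hqs, hps⟩ | ⟨qs, hqs, hps⟩)
    · exact bcond2_mpr cs _ qs hqs hps (by decide)
    · exact bcond2_mpr cs _ qs hqs hps (by decide)
    · exact bcond2_mpr cs _ qs hqs hps (by decide)
    · exact bcond2_mpr cs _ qs hqs hps (by decide)
    · exact bcond2_mpr cs _ qs hqs hps (by decide)
    · exact bcond2_mpr cs _ qs hqs hps (by decide)

theorem py_eq_alt (host : String) :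
    extract_all_domain_parts_py host = extract_all_domain_parts_py_alt host := by
  by_cases h0 : ∃ qs, qs ≠ [] ∧ mySplit host.toList = qs ++ [['c','o'], ['i','n']]
  · obtain ⟨qs, hqs, hps⟩ := h0
    have he0 : PySem.Str.endswith host ".co.in" = true :=
      (endswith_two host ".co.in" ['c','o'] ['i','n'] rfl (by decide) (by decide)).mpr ⟨qs, hqs, hps⟩
    have hA : extract_all_domain_parts_py host
        = PySem.Set.ofList ((qs.map String.ofList).filter (fun p => p != "" && p != "www" && p != "m")) := by
      simp only [extract_all_domain_parts_py, pvSuffixes, pvStripTLD, he0,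
        eq_self_iff_true, if_true, Bool.false_eq_true, if_false]
      rw [stripA_two host ".co.in" ['c','o'] ['i','n'] qs rfl (by decide) (by decide) hqs hps]
    have hp : ∃ qs, qs ≠ [] ∧ mySplit host.toList = qs ++ [['c','o'], ['i','n']] := ⟨qs, hqs, hps⟩
    have hB : extract_all_domain_parts_py_alt host
        = PySem.Set.ofList ((qs.map String.ofList).filter (fun p => p != "" && p != "www" && p != "m")) := by
      simp only [extract_all_domain_parts_py_alt]
      rw [split_getD, if_pos ((bcond1_iff host.toList).mpr (Or.inl hp)),
        take2_of host.toList ['c','o'] ['i','n'] qs hps]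
    rw [hA, hB]
  by_cases h1 : ∃ qs, qs ≠ [] ∧ mySplit host.toList = qs ++ [['c','o','m'], ['a','u']]
  · obtain ⟨qs, hqs, hps⟩ := h1
    have he0 : PySem.Str.endswith host ".co.in" = false :=
      Bool.eq_false_iff.mpr (fun hx => h0 ((endswith_two host ".co.in" ['c','o'] ['i','n'] rfl (by decide) (by decide)).mp hx))
    have he1 : PySem.Str.endswith host ".com.au" = true :=
      (endswith_two host ".com.au" ['c','o','m'] ['a','u'] rfl (by decide) (by decide)).mpr ⟨qs, hqs, hps⟩
    have hA : extract_all_domain_parts_py host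
        = PySem.Set.ofList ((qs.map String.ofList).filter (fun p => p != "" && p != "www" && p != "m")) := by
      simp only [extract_all_domain_parts_py, pvSuffixes, pvStripTLD, he0, he1,
        eq_self_iff_true, if_true, Bool.false_eq_true, if_false]
      rw [stripA_two host ".com.au" ['c','o','m'] ['a','u'] qs rfl (by decide) (by decide) hqs hps]
    have hp : ∃ qs, qs ≠ [] ∧ mySplit host.toList = qs ++ [['c','o','m'], ['a','u']] := ⟨qs, hqs, hps⟩
    have hB : extract_all_domain_parts_py_alt host
        = PySem.Set.ofList ((qs.map String.ofList).filter (fun p => p != "" && p != "www" && p != "m")) := by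
      simp only [extract_all_domain_parts_py_alt]
      rw [split_getD, if_pos ((bcond1_iff host.toList).mpr (Or.inr (Or.inl hp))),
        take2_of host.toList ['c','o','m'] ['a','u'] qs hps]
    rw [hA, hB]
  by_cases h2 : ∃ qs, qs ≠ [] ∧ mySplit host.toList = qs ++ [['c','o'], ['u','k']]
  · obtain ⟨qs, hqs, hps⟩ := h2
    have he0 : PySem.Str.endswith host ".co.in" = false :=
      Bool.eq_false_iff.mpr (fun hx => h0 ((endswith_two host ".co.in" ['c','o'] ['i','n'] rfl (by decide) (by decide)).mp hx))
    have he1 : PySem.Str.endswith host ".com.au" = false :=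
      Bool.eq_false_iff.mpr (fun hx => h1 ((endswith_two host ".com.au" ['c','o','m'] ['a','u'] rfl (by decide) (by decide)).mp hx))
    have he2 : PySem.Str.endswith host ".co.uk" = true :=
      (endswith_two host ".co.uk" ['c','o'] ['u','k'] rfl (by decide) (by decide)).mpr ⟨qs, hqs, hps⟩
    have hA : extract_all_domain_parts_py host
        = PySem.Set.ofList ((qs.map String.ofList).filter (fun p => p != "" && p != "www" && p != "m")) := by
      simp only [extract_all_domain_parts_py, pvSuffixes, pvStripTLD, he0, he1, he2,
        eq_self_iff_true, if_true, Bool.false_eq_true, if_false]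
      rw [stripA_two host ".co.uk" ['c','o'] ['u','k'] qs rfl (by decide) (by decide) hqs hps]
    have hp : ∃ qs, qs ≠ [] ∧ mySplit host.toList = qs ++ [['c','o'], ['u','k']] := ⟨qs, hqs, hps⟩
    have hB : extract_all_domain_parts_py_alt host
        = PySem.Set.ofList ((qs.map String.ofList).filter (fun p => p != "" && p != "www" && p != "m")) := by
      simp only [extract_all_domain_parts_py_alt]
      rw [split_getD, if_pos ((bcond1_iff host.toList).mpr (Or.inr (Or.inr hp))),
        take2_of host.toList ['c','o'] ['u','k'] qs hps]
    rw [hA, hB]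
  by_cases h3 : ∃ qs, qs ≠ [] ∧ mySplit host.toList = qs ++ [['c','o','m']]
  · obtain ⟨qs, hqs, hps⟩ := h3
    have he0 : PySem.Str.endswith host ".co.in" = false :=
      Bool.eq_false_iff.mpr (fun hx => h0 ((endswith_two host ".co.in" ['c','o'] ['i','n'] rfl (by decide) (by decide)).mp hx))
    have he1 : PySem.Str.endswith host ".com.au" = false :=
      Bool.eq_false_iff.mpr (fun hx => h1 ((endswith_two host ".com.au" ['c','o','m'] ['a','u'] rfl (by decide) (by decide)).mp hx))
    have he2 : PySem.Str.endswith host ".co.uk" = false :=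
      Bool.eq_false_iff.mpr (fun hx => h2 ((endswith_two host ".co.uk" ['c','o'] ['u','k'] rfl (by decide) (by decide)).mp hx))
    have he3 : PySem.Str.endswith host ".com" = true :=
      (endswith_one host ".com" ['c','o','m'] rfl (by decide)).mpr ⟨qs, hqs, hps⟩
    have hA : extract_all_domain_parts_py host
        = PySem.Set.ofList ((qs.map String.ofList).filter (fun p => p != "" && p != "www" && p != "m")) := by
      simp only [extract_all_domain_parts_py, pvSuffixes, pvStripTLD, he0, he1, he2, he3,
        eq_self_iff_true, if_true, Bool.false_eq_true, if_false]
      rw [stripA_one host ".com" ['c','o','m'] qs rfl (by decide) hqs hps]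
    have hp : ∃ qs, qs ≠ [] ∧ mySplit host.toList = qs ++ [['c','o','m']] := ⟨qs, hqs, hps⟩
    have hnb1 : ¬(2 < ((mySplit host.toList).map String.ofList).length ∧
        PySem.Set.contains (PySem.Set.ofList ["co.in", "com.au", "co.uk"])
          (PySem.Str.join "." (PySem.List.slice ((mySplit host.toList).map String.ofList) (some (-2)) none)) = true) := by
      rw [bcond1_iff host.toList]
      rintro (h | h | h)
      · exact h0 h
      · exact h1 h
      · exact h2 h
    have hB : extract_all_domain_parts_py_alt host
        = PySem.Set.ofList ((qs.map String.ofList).filter (fun p => p != "" && p != "www" && p != "m")) := by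
      simp only [extract_all_domain_parts_py_alt]
      rw [split_getD, if_neg hnb1, if_pos ((bcond2_iff host.toList).mpr (Or.inl hp)),
        drop1_of host.toList ['c','o','m'] qs hps]
    rw [hA, hB]
  by_cases h4 : ∃ qs, qs ≠ [] ∧ mySplit host.toList = qs ++ [['i','n']]
  · obtain ⟨qs, hqs, hps⟩ := h4
    have he0 : PySem.Str.endswith host ".co.in" = false :=
      Bool.eq_false_iff.mpr (fun hx => h0 ((endswith_two host ".co.in" ['c','o'] ['i','n'] rfl (by decide) (by decide)).mp hx))
    have he1 : PySem.Str.endswith host ".com.au" = false :=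
      Bool.eq_false_iff.mpr (fun hx => h1 ((endswith_two host ".com.au" ['c','o','m'] ['a','u'] rfl (by decide) (by decide)).mp hx))
    have he2 : PySem.Str.endswith host ".co.uk" = false :=
      Bool.eq_false_iff.mpr (fun hx => h2 ((endswith_two host ".co.uk" ['c','o'] ['u','k'] rfl (by decide) (by decide)).mp hx))
    have he3 : PySem.Str.endswith host ".com" = false :=
      Bool.eq_false_iff.mpr (fun hx => h3 ((endswith_one host ".com" ['c','o','m'] rfl (by decide)).mp hx))
    have he4 : PySem.Str.endswith host ".in" = true :=
      (endswith_one host ".in" ['i','n'] rfl (by decide)).mpr ⟨qs, hqs, hps⟩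
    have hA : extract_all_domain_parts_py host
        = PySem.Set.ofList ((qs.map String.ofList).filter (fun p => p != "" && p != "www" && p != "m")) := by
      simp only [extract_all_domain_parts_py, pvSuffixes, pvStripTLD, he0, he1, he2, he3, he4,
        eq_self_iff_true, if_true, Bool.false_eq_true, if_false]
      rw [stripA_one host ".in" ['i','n'] qs rfl (by decide) hqs hps]
    have hp : ∃ qs, qs ≠ [] ∧ mySplit host.toList = qs ++ [['i','n']] := ⟨qs, hqs, hps⟩
    have hnb1 : ¬(2 < ((mySplit host.toList).map String.ofList).length ∧
        PySem.Set.contains (PySem.Set.ofList ["co.in", "com.au", "co.uk"])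
          (PySem.Str.join "." (PySem.List.slice ((mySplit host.toList).map String.ofList) (some (-2)) none)) = true) := by
      rw [bcond1_iff host.toList]
      rintro (h | h | h)
      · exact h0 h
      · exact h1 h
      · exact h2 h
    have hB : extract_all_domain_parts_py_alt host
        = PySem.Set.ofList ((qs.map String.ofList).filter (fun p => p != "" && p != "www" && p != "m")) := by
      simp only [extract_all_domain_parts_py_alt]
      rw [split_getD, if_neg hnb1, if_pos ((bcond2_iff host.toList).mpr (Or.inr (Or.inl hp))),
        drop1_of host.toList ['i','n'] qs hps]
    rw [hA, hB]
  by_cases h5 : ∃ qs, qs ≠ [] ∧ mySplit host.toList = qs ++ [['n','e','t']]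
  · obtain ⟨qs, hqs, hps⟩ := h5
    have he0 : PySem.Str.endswith host ".co.in" = false :=
      Bool.eq_false_iff.mpr (fun hx => h0 ((endswith_two host ".co.in" ['c','o'] ['i','n'] rfl (by decide) (by decide)).mp hx))
    have he1 : PySem.Str.endswith host ".com.au" = false :=
      Bool.eq_false_iff.mpr (fun hx => h1 ((endswith_two host ".com.au" ['c','o','m'] ['a','u'] rfl (by decide) (by decide)).mp hx))
    have he2 : PySem.Str.endswith host ".co.uk" = false :=
      Bool.eq_false_iff.mpr (fun hx => h2 ((endswith_two host ".co.uk" ['c','o'] ['u','k'] rfl (by decide) (by decide)).mp hx))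
    have he3 : PySem.Str.endswith host ".com" = false :=
      Bool.eq_false_iff.mpr (fun hx => h3 ((endswith_one host ".com" ['c','o','m'] rfl (by decide)).mp hx))
    have he4 : PySem.Str.endswith host ".in" = false :=
      Bool.eq_false_iff.mpr (fun hx => h4 ((endswith_one host ".in" ['i','n'] rfl (by decide)).mp hx))
    have he5 : PySem.Str.endswith host ".net" = true :=
      (endswith_one host ".net" ['n','e','t'] rfl (by decide)).mpr ⟨qs, hqs, hps⟩
    have hA : extract_all_domain_parts_py host
        = PySem.Set.ofList ((qs.map String.ofList).filter (fun p => p != "" && p != "www" && p != "m")) := by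
      simp only [extract_all_domain_parts_py, pvSuffixes, pvStripTLD, he0, he1, he2, he3, he4, he5,
        eq_self_iff_true, if_true, Bool.false_eq_true, if_false]
      rw [stripA_one host ".net" ['n','e','t'] qs rfl (by decide) hqs hps]
    have hp : ∃ qs, qs ≠ [] ∧ mySplit host.toList = qs ++ [['n','e','t']] := ⟨qs, hqs, hps⟩
    have hnb1 : ¬(2 < ((mySplit host.toList).map String.ofList).length ∧
        PySem.Set.contains (PySem.Set.ofList ["co.in", "com.au", "co.uk"])
          (PySem.Str.join "." (PySem.List.slice ((mySplit host.toList).map String.ofList) (some (-2)) none)) = true) := by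
      rw [bcond1_iff host.toList]
      rintro (h | h | h)
      · exact h0 h
      · exact h1 h
      · exact h2 h
    have hB : extract_all_domain_parts_py_alt host
        = PySem.Set.ofList ((qs.map String.ofList).filter (fun p => p != "" && p != "www" && p != "m")) := by
      simp only [extract_all_domain_parts_py_alt]
      rw [split_getD, if_neg hnb1, if_pos ((bcond2_iff host.toList).mpr (Or.inr (Or.inr (Or.inl hp)))),
        drop1_of host.toList ['n','e','t'] qs hps]
    rw [hA, hB]
  by_cases h6 : ∃ qs, qs ≠ [] ∧ mySplit host.toList = qs ++ [['i','o']]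
  · obtain ⟨qs, hqs, hps⟩ := h6
    have he0 : PySem.Str.endswith host ".co.in" = false :=
      Bool.eq_false_iff.mpr (fun hx => h0 ((endswith_two host ".co.in" ['c','o'] ['i','n'] rfl (by decide) (by decide)).mp hx))
    have he1 : PySem.Str.endswith host ".com.au" = false :=
      Bool.eq_false_iff.mpr (fun hx => h1 ((endswith_two host ".com.au" ['c','o','m'] ['a','u'] rfl (by decide) (by decide)).mp hx))
    have he2 : PySem.Str.endswith host ".co.uk" = false :=
      Bool.eq_false_iff.mpr (fun hx => h2 ((endswith_two host ".co.uk" ['c','o'] ['u','k'] rfl (by decide) (by decide)).mp hx))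
    have he3 : PySem.Str.endswith host ".com" = false :=
      Bool.eq_false_iff.mpr (fun hx => h3 ((endswith_one host ".com" ['c','o','m'] rfl (by decide)).mp hx))
    have he4 : PySem.Str.endswith host ".in" = false :=
      Bool.eq_false_iff.mpr (fun hx => h4 ((endswith_one host ".in" ['i','n'] rfl (by decide)).mp hx))
    have he5 : PySem.Str.endswith host ".net" = false :=
      Bool.eq_false_iff.mpr (fun hx => h5 ((endswith_one host ".net" ['n','e','t'] rfl (by decide)).mp hx))
    have he6 : PySem.Str.endswith host ".io" = true :=
      (endswith_one host ".io" ['i','o'] rfl (by decide)).mpr ⟨qs, hqs, hps⟩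
    have hA : extract_all_domain_parts_py host
        = PySem.Set.ofList ((qs.map String.ofList).filter (fun p => p != "" && p != "www" && p != "m")) := by
      simp only [extract_all_domain_parts_py, pvSuffixes, pvStripTLD, he0, he1, he2, he3, he4, he5, he6,
        eq_self_iff_true, if_true, Bool.false_eq_true, if_false]
      rw [stripA_one host ".io" ['i','o'] qs rfl (by decide) hqs hps]
    have hp : ∃ qs, qs ≠ [] ∧ mySplit host.toList = qs ++ [['i','o']] := ⟨qs, hqs, hps⟩
    have hnb1 : ¬(2 < ((mySplit host.toList).map String.ofList).length ∧
        PySem.Set.contains (PySem.Set.ofList ["co.in", "com.au", "co.uk"])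
          (PySem.Str.join "." (PySem.List.slice ((mySplit host.toList).map String.ofList) (some (-2)) none)) = true) := by
      rw [bcond1_iff host.toList]
      rintro (h | h | h)
      · exact h0 h
      · exact h1 h
      · exact h2 h
    have hB : extract_all_domain_parts_py_alt host
        = PySem.Set.ofList ((qs.map String.ofList).filter (fun p => p != "" && p != "www" && p != "m")) := by
      simp only [extract_all_domain_parts_py_alt]
      rw [split_getD, if_neg hnb1, if_pos ((bcond2_iff host.toList).mpr (Or.inr (Or.inr (Or.inr (Or.inl hp))))),
        drop1_of host.toList ['i','o'] qs hps]
    rw [hA, hB]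
  by_cases h7 : ∃ qs, qs ≠ [] ∧ mySplit host.toList = qs ++ [['c','o']]
  · obtain ⟨qs, hqs, hps⟩ := h7
    have he0 : PySem.Str.endswith host ".co.in" = false :=
      Bool.eq_false_iff.mpr (fun hx => h0 ((endswith_two host ".co.in" ['c','o'] ['i','n'] rfl (by decide) (by decide)).mp hx))
    have he1 : PySem.Str.endswith host ".com.au" = false :=
      Bool.eq_false_iff.mpr (fun hx => h1 ((endswith_two host ".com.au" ['c','o','m'] ['a','u'] rfl (by decide) (by decide)).mp hx))
    have he2 : PySem.Str.endswith host ".co.uk" = false :=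
      Bool.eq_false_iff.mpr (fun hx => h2 ((endswith_two host ".co.uk" ['c','o'] ['u','k'] rfl (by decide) (by decide)).mp hx))
    have he3 : PySem.Str.endswith host ".com" = false :=
      Bool.eq_false_iff.mpr (fun hx => h3 ((endswith_one host ".com" ['c','o','m'] rfl (by decide)).mp hx))
    have he4 : PySem.Str.endswith host ".in" = false :=
      Bool.eq_false_iff.mpr (fun hx => h4 ((endswith_one host ".in" ['i','n'] rfl (by decide)).mp hx))
    have he5 : PySem.Str.endswith host ".net" = false :=
      Bool.eq_false_iff.mpr (fun hx => h5 ((endswith_one host ".net" ['n','e','t'] rfl (by decide)).mp hx))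
    have he6 : PySem.Str.endswith host ".io" = false :=
      Bool.eq_false_iff.mpr (fun hx => h6 ((endswith_one host ".io" ['i','o'] rfl (by decide)).mp hx))
    have he7 : PySem.Str.endswith host ".co" = true :=
      (endswith_one host ".co" ['c','o'] rfl (by decide)).mpr ⟨qs, hqs, hps⟩
    have hA : extract_all_domain_parts_py host
        = PySem.Set.ofList ((qs.map String.ofList).filter (fun p => p != "" && p != "www" && p != "m")) := by
      simp only [extract_all_domain_parts_py, pvSuffixes, pvStripTLD, he0, he1, he2, he3, he4, he5, he6, he7,
        eq_self_iff_true, if_true, Bool.false_eq_true, if_false]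
      rw [stripA_one host ".co" ['c','o'] qs rfl (by decide) hqs hps]
    have hp : ∃ qs, qs ≠ [] ∧ mySplit host.toList = qs ++ [['c','o']] := ⟨qs, hqs, hps⟩
    have hnb1 : ¬(2 < ((mySplit host.toList).map String.ofList).length ∧
        PySem.Set.contains (PySem.Set.ofList ["co.in", "com.au", "co.uk"])
          (PySem.Str.join "." (PySem.List.slice ((mySplit host.toList).map String.ofList) (some (-2)) none)) = true) := by
      rw [bcond1_iff host.toList]
      rintro (h | h | h)
      · exact h0 h
      · exact h1 h
      · exact h2 h
    have hB : extract_all_domain_parts_py_alt host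
        = PySem.Set.ofList ((qs.map String.ofList).filter (fun p => p != "" && p != "www" && p != "m")) := by
      simp only [extract_all_domain_parts_py_alt]
      rw [split_getD, if_neg hnb1, if_pos ((bcond2_iff host.toList).mpr (Or.inr (Or.inr (Or.inr (Or.inr (Or.inl hp)))))),
        drop1_of host.toList ['c','o'] qs hps]
    rw [hA, hB]
  by_cases h8 : ∃ qs, qs ≠ [] ∧ mySplit host.toList = qs ++ [['o','r','g']]
  · obtain ⟨qs, hqs, hps⟩ := h8
    have he0 : PySem.Str.endswith host ".co.in" = false :=
      Bool.eq_false_iff.mpr (fun hx => h0 ((endswith_two host ".co.in" ['c','o'] ['i','n'] rfl (by decide) (by decide)).mp hx))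
    have he1 : PySem.Str.endswith host ".com.au" = false :=
      Bool.eq_false_iff.mpr (fun hx => h1 ((endswith_two host ".com.au" ['c','o','m'] ['a','u'] rfl (by decide) (by decide)).mp hx))
    have he2 : PySem.Str.endswith host ".co.uk" = false :=
      Bool.eq_false_iff.mpr (fun hx => h2 ((endswith_two host ".co.uk" ['c','o'] ['u','k'] rfl (by decide) (by decide)).mp hx))
    have he3 : PySem.Str.endswith host ".com" = false :=
      Bool.eq_false_iff.mpr (fun hx => h3 ((endswith_one host ".com" ['c','o','m'] rfl (by decide)).mp hx))
    have he4 : PySem.Str.endswith host ".in" = false :=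
      Bool.eq_false_iff.mpr (fun hx => h4 ((endswith_one host ".in" ['i','n'] rfl (by decide)).mp hx))
    have he5 : PySem.Str.endswith host ".net" = false :=
      Bool.eq_false_iff.mpr (fun hx => h5 ((endswith_one host ".net" ['n','e','t'] rfl (by decide)).mp hx))
    have he6 : PySem.Str.endswith host ".io" = false :=
      Bool.eq_false_iff.mpr (fun hx => h6 ((endswith_one host ".io" ['i','o'] rfl (by decide)).mp hx))
    have he7 : PySem.Str.endswith host ".co" = false :=
      Bool.eq_false_iff.mpr (fun hx => h7 ((endswith_one host ".co" ['c','o'] rfl (by decide)).mp hx))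
    have he8 : PySem.Str.endswith host ".org" = true :=
      (endswith_one host ".org" ['o','r','g'] rfl (by decide)).mpr ⟨qs, hqs, hps⟩
    have hA : extract_all_domain_parts_py host
        = PySem.Set.ofList ((qs.map String.ofList).filter (fun p => p != "" && p != "www" && p != "m")) := by
      simp only [extract_all_domain_parts_py, pvSuffixes, pvStripTLD, he0, he1, he2, he3, he4, he5, he6, he7, he8,
        eq_self_iff_true, if_true, Bool.false_eq_true, if_false]
      rw [stripA_one host ".org" ['o','r','g'] qs rfl (by decide) hqs hps]
    have hp : ∃ qs, qs ≠ [] ∧ mySplit host.toList = qs ++ [['o','r','g']] := ⟨qs, hqs, hps⟩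
    have hnb1 : ¬(2 < ((mySplit host.toList).map String.ofList).length ∧
        PySem.Set.contains (PySem.Set.ofList ["co.in", "com.au", "co.uk"])
          (PySem.Str.join "." (PySem.List.slice ((mySplit host.toList).map String.ofList) (some (-2)) none)) = true) := by
      rw [bcond1_iff host.toList]
      rintro (h | h | h)
      · exact h0 h
      · exact h1 h
      · exact h2 h
    have hB : extract_all_domain_parts_py_alt host
        = PySem.Set.ofList ((qs.map String.ofList).filter (fun p => p != "" && p != "www" && p != "m")) := by
      simp only [extract_all_domain_parts_py_alt]
      rw [split_getD, if_neg hnb1, if_pos ((bcond2_iff host.toList).mpr (Or.inr (Or.inr (Or.inr (Or.inr (Or.inr hp)))))),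
        drop1_of host.toList ['o','r','g'] qs hps]
    rw [hA, hB]
  · have he0 : PySem.Str.endswith host ".co.in" = false :=
      Bool.eq_false_iff.mpr (fun hx => h0 ((endswith_two host ".co.in" ['c','o'] ['i','n'] rfl (by decide) (by decide)).mp hx))
    have he1 : PySem.Str.endswith host ".com.au" = false :=
      Bool.eq_false_iff.mpr (fun hx => h1 ((endswith_two host ".com.au" ['c','o','m'] ['a','u'] rfl (by decide) (by decide)).mp hx))
    have he2 : PySem.Str.endswith host ".co.uk" = false :=
      Bool.eq_false_iff.mpr (fun hx => h2 ((endswith_two host ".co.uk" ['c','o'] ['u','k'] rfl (by decide) (by decide)).mp hx))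
    have he3 : PySem.Str.endswith host ".com" = false :=
      Bool.eq_false_iff.mpr (fun hx => h3 ((endswith_one host ".com" ['c','o','m'] rfl (by decide)).mp hx))
    have he4 : PySem.Str.endswith host ".in" = false :=
      Bool.eq_false_iff.mpr (fun hx => h4 ((endswith_one host ".in" ['i','n'] rfl (by decide)).mp hx))
    have he5 : PySem.Str.endswith host ".net" = false :=
      Bool.eq_false_iff.mpr (fun hx => h5 ((endswith_one host ".net" ['n','e','t'] rfl (by decide)).mp hx))
    have he6 : PySem.Str.endswith host ".io" = false :=
      Bool.eq_false_iff.mpr (fun hx => h6 ((endswith_one host ".io" ['i','o'] rfl (by decide)).mp hx))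
    have he7 : PySem.Str.endswith host ".co" = false :=
      Bool.eq_false_iff.mpr (fun hx => h7 ((endswith_one host ".co" ['c','o'] rfl (by decide)).mp hx))
    have he8 : PySem.Str.endswith host ".org" = false :=
      Bool.eq_false_iff.mpr (fun hx => h8 ((endswith_one host ".org" ['o','r','g'] rfl (by decide)).mp hx))
    have hnb1 : ¬(2 < ((mySplit host.toList).map String.ofList).length ∧
        PySem.Set.contains (PySem.Set.ofList ["co.in", "com.au", "co.uk"])
          (PySem.Str.join "." (PySem.List.slice ((mySplit host.toList).map String.ofList) (some (-2)) none)) = true) := by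
      rw [bcond1_iff host.toList]
      rintro (h | h | h)
      · exact h0 h
      · exact h1 h
      · exact h2 h
    have hnb2 : ¬(1 < ((mySplit host.toList).map String.ofList).length ∧
        PySem.Set.contains (PySem.Set.ofList ["com", "in", "net", "io", "co", "org"])
          ((PySem.List.pyGet? ((mySplit host.toList).map String.ofList) (-1)).getD "") = true) := by
      rw [bcond2_iff host.toList]
      rintro (h | h | h | h | h | h)
      · exact h3 h
      · exact h4 h
      · exact h5 h
      · exact h6 h
      · exact h7 h
      · exact h8 h
    have hA : extract_all_domain_parts_py host
        = PySem.Set.ofList ((((mySplit host.toList).map String.ofList)).filter (fun p => p != "" && p != "www" && p != "m")) := by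
      simp only [extract_all_domain_parts_py, pvSuffixes, pvStripTLD, he0, he1, he2, he3, he4, he5, he6, he7, he8,
        Bool.false_eq_true, if_false]
      rw [split_getD]
    have hB : extract_all_domain_parts_py_alt host
        = PySem.Set.ofList ((((mySplit host.toList).map String.ofList)).filter (fun p => p != "" && p != "www" && p != "m")) := by
      simp only [extract_all_domain_parts_py_alt]
      rw [split_getD, if_neg hnb1, if_neg hnb2]
    rw [hA, hB]

-- ===== VERDICT (by name: the statement is the Claim_ definition above) =====
theorem extract_all_domain_parts_py_spec : Claim_equal_extract_all_domain_parts_py := by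
  intro host _
  unfold Spec_extract_all_domain_parts_py
  exact py_eq_alt host
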